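-- pv_equiv track=rewrite | github.com/soob511/algostudy | 2023/1130_귤나누기_예상대진표/1130_이길상.py | solution
-- ===== SOURCE A (Python) =====
-- def solution(k, tangerine):
--     count = dict()
--
--     for t in tangerine:
--         if t in count:
--             count[t] += 1
--         else:
--             count[t] = 1
--
--     values = sorted(list(count.values()))
--
--     answer = 0
--     while k > 0:
--         k -= values.pop()
--         answer += 1
--
--     return answer
-- ===== SOURCE B (Python) =====
-- def solution(k, tangerine):
--     freq = {}
--     for t in tangerine:
--         freq[t] = freq.get(t, 0) + 1
--     bucket = {}
--     for c in freq.values():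
--         bucket[c] = bucket.get(c, 0) + 1
--     n = len(tangerine)
--     answer = 0
--     c = n
--     while k > 0 and c > 0:
--         use = min(bucket.get(c, 0), (k + c - 1) // c)
--         answer += use
--         k -= use * c
--         c -= 1
--     return answer
-- ===== Notes on version B (the rewrite author's own statement) =====
-- stated objective: alternative
-- what changed: B replaces A's sort-then-pop greedy (sort the distinct frequencies, pop the largest one group at a time) by a bucket count over frequency values and a single descending scan c=n..1 that takes min(bucket[c], ceil(k/c)) groups of size c at once, with no sorting and no per-group loop.
import Mathlib
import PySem

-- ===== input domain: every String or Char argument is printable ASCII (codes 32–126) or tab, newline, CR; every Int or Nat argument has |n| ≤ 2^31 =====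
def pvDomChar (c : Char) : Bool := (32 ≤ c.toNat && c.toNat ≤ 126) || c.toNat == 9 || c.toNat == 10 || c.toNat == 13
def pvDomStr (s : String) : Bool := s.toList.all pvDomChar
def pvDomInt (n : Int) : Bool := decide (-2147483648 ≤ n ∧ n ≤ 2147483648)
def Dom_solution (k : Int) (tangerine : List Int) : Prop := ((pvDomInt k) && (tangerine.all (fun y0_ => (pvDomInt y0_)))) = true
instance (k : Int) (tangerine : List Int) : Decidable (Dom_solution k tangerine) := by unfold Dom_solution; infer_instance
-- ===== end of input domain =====

-- B replaces A's sort-then-pop greedy by a bucket count over frequency values and one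
-- descending scan taking min(bucket[c], ceil(k/c)) groups of size c at once (no sort).


-- ===== PORT A =====
-- 'while k > 0: k -= values.pop(); answer += 1'
def solutionLoopA (k : Int) (vs : List Int) (ans : Int) : Int :=
  if k > 0 then
    match h : PySem.List.pop? vs (-1) with
    | some (v, rest) => solutionLoopA (k - v) rest (ans + 1)
    | none => ans  -- Python raises IndexError here; excluded by Pre_solution
  else ans
termination_by vs.length
decreasing_by have := PySem.List.length_of_pop?_eq_some vs h; simp at this; omega

def solution (k : Int) (tangerine : List Int) : Int :=
  let count := tangerine.foldl
    (fun d t => if d.contains t then d.insert t (d.getD t 0 + 1) else d.insert t 1)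
    PySem.Dict.empty
  let values := PySem.List.sorted count.values (fun x => x) false
  solutionLoopA k values 0

-- ===== PORT B =====
-- 'while k > 0 and c > 0: use = min(bucket.get(c, 0), (k + c - 1) // c); …; c -= 1'
def solutionLoopB (bucket : PySem.Dict Int Int) : Nat → Int → Int → Int
  | 0, _, ans => ans
  | c + 1, k, ans =>
    if k > 0 then
      let ci : Int := (c : Int) + 1
      let use := min (bucket.getD ci 0) (PySem.Int.floordiv (k + ci - 1) ci)
      solutionLoopB bucket c (k - use * ci) (ans + use)
    else ans

def solution_alt (k : Int) (tangerine : List Int) : Int :=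
  let freq := tangerine.foldl (fun d t => d.insert t (d.getD t 0 + 1)) PySem.Dict.empty
  let bucket := freq.values.foldl (fun d c => d.insert c (d.getD c 0 + 1)) PySem.Dict.empty
  solutionLoopB bucket tangerine.length k 0

-- ===== PRECONDITION & SPEC =====
-- Pre_ excludes exactly the inputs where Python A raises IndexError (pop from an empty
-- list): k larger than the total number of tangerines.
def Pre_solution (k : Int) (tangerine : List Int) : Prop := k ≤ (tangerine.length : Int)
instance (k : Int) (tangerine : List Int) : Decidable (Pre_solution k tangerine) := by
  unfold Pre_solution; infer_instance

def pvWitness_solution : Int × List Int := (2, [1, 1, 2])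

def Spec_solution (k : Int) (tangerine : List Int) (out : Int) : Prop := out = solution_alt k tangerine
instance (k : Int) (tangerine : List Int) (out : Int) : Decidable (Spec_solution k tangerine out) := by unfold Spec_solution; infer_instance

-- ===== CLAIM (what is proved, stated in full; the proofs are below) =====
def Claim_equal_solution : Prop := ∀ (k : Int) (tangerine : List Int), Dom_solution k tangerine → Pre_solution k tangerine → Spec_solution k tangerine (solution k tangerine)

-- ===== LEMMAS AND PROOFS =====

-- A's pop loop, rephrased as a head loop over the reversed (i.e. descending) list.
def loopD : List Int → Int → Int → Int
  | [], _, ans => ans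
  | v :: r, k, ans => if k > 0 then loopD r (k - v) (ans + 1) else ans

theorem loopD_nonpos (l : List Int) (k ans : Int) (h : ¬ k > 0) : loopD l k ans = ans := by
  cases l <;> simp [loopD, h]

theorem loopA_eq_loopD (l : List Int) (k ans : Int) :
    solutionLoopA k l.reverse ans = loopD l k ans := by
  induction l generalizing k ans with
  | nil =>
    unfold solutionLoopA
    simp only [List.reverse_nil, loopD]
    split
    · split
      · next heq => exact absurd heq (by simp [PySem.List.pop?, PySem.List.pyIdx?])
      · rfl
    · rfl
  | cons v r ih =>
    unfold solutionLoopA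
    simp only [loopD]
    by_cases hk : k > 0
    · rw [if_pos hk, if_pos hk]
      split
      · next v1 rest heq =>
          rw [List.reverse_cons, PySem.List.pop?_last] at heq
          simp only [Option.some.injEq, Prod.mk.injEq] at heq
          obtain ⟨rfl, rfl⟩ := heq
          exact ih (k - v) (ans + 1)
      · next heq =>
          rw [List.reverse_cons, PySem.List.pop?_last] at heq
          exact absurd heq (by simp)
    · rw [if_neg hk, if_neg hk]

theorem loopB_nonpos (b : PySem.Dict Int Int) (c : Nat) (k ans : Int) (h : ¬ k > 0) :
    solutionLoopB b c k ans = ans := by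
  cases c <;> simp [solutionLoopB, h]

-- the sizes n, n-1, …, 1 as Ints
def descList : Nat → List Int
  | 0 => []
  | c + 1 => ((c : Int) + 1) :: descList c

theorem mem_descList (n : Nat) (x : Int) : x ∈ descList n ↔ 1 ≤ x ∧ x ≤ (n : Int) := by
  induction n with
  | zero => simp [descList]; omega
  | succ m ih =>
    simp [descList, ih]
    omega

-- running A's one-at-a-time loop through a run of m groups of size c equals B's
-- closed-form step: stop inside the run after ceil(k/c) groups, or consume all m.
theorem runD (m : Nat) (c : Int) (hc : 0 < c) (rest : List Int) (k ans : Int) (hk : 0 < k) :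
    loopD (List.replicate m c ++ rest) k ans =
      if k ≤ (m : Int) * c then ans + PySem.Int.floordiv (k + c - 1) c
      else loopD rest (k - m * c) (ans + m) := by
  induction m generalizing k ans with
  | zero =>
    simp only [List.replicate, List.nil_append, Nat.cast_zero, zero_mul]
    rw [if_neg (by omega)]
    norm_num
  | succ m ih =>
    simp only [List.replicate_succ, List.cons_append, loopD, if_pos hk]
    by_cases h2 : k - c > 0
    · rw [ih (k - c) (ans + 1) h2]
      have hcond : (k - c ≤ (m : Int) * c) ↔ (k ≤ ((m + 1 : Nat) : Int) * c) := by
        push_cast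
        constructor <;> intro h <;> nlinarith
      have hceil : PySem.Int.floordiv (k - c + c - 1) c + 1 = PySem.Int.floordiv (k + c - 1) c := by
        rw [PySem.Int.floordiv_eq_ediv_of_pos hc, PySem.Int.floordiv_eq_ediv_of_pos hc]
        have : k + c - 1 = (k - c + c - 1) + 1 * c := by ring
        rw [this, Int.add_mul_ediv_right _ _ (by omega)]
      by_cases h3 : k - c ≤ (m : Int) * c
      · rw [if_pos h3, if_pos (hcond.mp h3)]
        rw [← hceil]; ring
      · rw [if_neg h3, if_neg (fun h => h3 (hcond.mpr h))]
        congr 1 <;> push_cast <;> ring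
    · have hkc : k ≤ c := by omega
      rw [loopD_nonpos _ _ _ h2]
      have hle : k ≤ ((m + 1 : Nat) : Int) * c := by push_cast; nlinarith
      rw [if_pos hle]
      have : PySem.Int.floordiv (k + c - 1) c = 1 := by
        rw [PySem.Int.floordiv_eq_iff_of_pos hc]
        constructor <;> nlinarith
      rw [this]

-- ceiling-division brackets used to compare ceil(k/c) with the bucket count m
theorem ceil_le_of_le (k c m : Int) (hc : 0 < c) (h : k ≤ m * c) :
    PySem.Int.floordiv (k + c - 1) c ≤ m := by
  have := (PySem.Int.floordiv_lt_iff_lt_mul (a := k + c - 1) (b := c) (q := m + 1) hc).mpr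
    (by nlinarith)
  omega

theorem le_ceil_of_lt (k c m : Int) (hc : 0 < c) (h : m * c < k) :
    m ≤ PySem.Int.floordiv (k + c - 1) c := by
  exact (PySem.Int.le_floordiv_iff_mul_le (a := k + c - 1) (b := c) (q := m) hc).mpr (by nlinarith)

theorem k_le_ceil_mul (k c : Int) (hc : 0 < c) :
    k ≤ PySem.Int.floordiv (k + c - 1) c * c := by
  have h1 := PySem.Int.floordiv_mul_add_mod (k + c - 1) c
  have h2 := PySem.Int.mod_lt (k + c - 1) hc
  have h3 := PySem.Int.mod_nonneg (k + c - 1) hc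
  omega

-- B's descending scan computes exactly A's loop over the descending run-list.
theorem mainLoop (vals : List Int) (c : Nat) (k ans : Int) :
    loopD ((descList c).flatMap (fun v => List.replicate (vals.count v) v)) k ans
      = solutionLoopB (PySem.Dict.counter vals) c k ans := by
  induction c generalizing k ans with
  | zero => simp [descList, loopD, solutionLoopB]
  | succ c ih =>
    by_cases hk : k > 0
    · simp only [descList, List.flatMap_cons, solutionLoopB, if_pos hk]
      set ci : Int := (c : Int) + 1 with hci
      have hcpos : 0 < ci := by omega
      set m : Nat := vals.count ci with hm
      rw [runD m ci hcpos _ k ans hk]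
      rw [PySem.Dict.getD_counter]
      by_cases h3 : k ≤ (m : Int) * ci
      · rw [if_pos h3]
        have hle : PySem.Int.floordiv (k + ci - 1) ci ≤ (m : Int) := ceil_le_of_le k ci m hcpos h3
        rw [min_eq_right hle]
        rw [loopB_nonpos _ _ _ _ (by have := k_le_ceil_mul k ci hcpos; nlinarith)]
      · rw [if_neg h3]
        have hge : (m : Int) ≤ PySem.Int.floordiv (k + ci - 1) ci :=
          le_ceil_of_lt k ci m hcpos (by omega)
        rw [min_eq_left hge, ih]
    · rw [loopD_nonpos _ _ _ hk, loopB_nonpos _ _ _ _ hk]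

-- the descending run-list is a permutation of vals …
theorem count_flat (vals : List Int) (n : Nat) (x : Int) :
    ((descList n).flatMap (fun v => List.replicate (vals.count v) v)).count x
      = if x ∈ descList n then vals.count x else 0 := by
  induction n with
  | zero => simp [descList]
  | succ m ih =>
    simp only [descList, List.flatMap_cons, List.count_append, ih, List.count_replicate]
    have hmem := mem_descList m x
    by_cases hx : x = (m : Int) + 1
    · subst hx
      have hnot : ((m : Int) + 1) ∉ descList m := by rw [hmem]; omega
      simp [hnot]
    · by_cases h2 : x ∈ descList m <;>
        simp [h2, hx, Ne.symm hx]

theorem flat_perm (vals : List Int) (n : Nat)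
    (hpos : ∀ v ∈ vals, 1 ≤ v) (hle : ∀ v ∈ vals, v ≤ (n : Int)) :
    ((descList n).flatMap (fun v => List.replicate (vals.count v) v)).Perm vals := by
  rw [List.perm_iff_count]
  intro x
  rw [count_flat]
  by_cases hx : x ∈ descList n
  · rw [if_pos hx]
  · rw [if_neg hx]
    rcases Nat.eq_zero_or_pos (vals.count x) with h | h
    · omega
    · exfalso
      have hxm : x ∈ vals := List.count_pos_iff.mp h
      exact hx ((mem_descList n x).mpr ⟨hpos x hxm, hle x hxm⟩)

-- … and it is descending
theorem flat_desc (vals : List Int) (n : Nat) :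
    ((descList n).flatMap (fun v => List.replicate (vals.count v) v)).Pairwise
      (fun a b => b ≤ a) := by
  induction n with
  | zero => simp [descList]
  | succ m ih =>
    simp only [descList, List.flatMap_cons]
    rw [List.pairwise_append]
    refine ⟨List.pairwise_replicate.mpr (by simp), ih, ?_⟩
    intro a ha b hb
    have ha' : a = (m : Int) + 1 := (List.eq_of_mem_replicate ha)
    rcases List.mem_flatMap.mp hb with ⟨v, hv, hbv⟩
    have hb' : b = v := List.eq_of_mem_replicate hbv
    have := (mem_descList m v).mp hv
    omega

theorem sorted_eq_flat_rev (vals : List Int) (n : Nat)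
    (hpos : ∀ v ∈ vals, 1 ≤ v) (hle : ∀ v ∈ vals, v ≤ (n : Int)) :
    PySem.List.sorted vals (fun x => x) false
      = ((descList n).flatMap (fun v => List.replicate (vals.count v) v)).reverse := by
  apply PySem.List.sorted_id_eq_of_perm_of_pairwise
  · exact (List.reverse_perm _).trans (flat_perm vals n hpos hle)
  · rw [List.pairwise_reverse]
    exact flat_desc vals n

-- A's counting loop is Counter(tangerine); its values are the per-size counts.
theorem countDict_eq_counter (tangerine : List Int) :
    tangerine.foldl
      (fun d t => if d.contains t then d.insert t (d.getD t 0 + 1) else d.insert t 1)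
      PySem.Dict.empty = PySem.Dict.counter tangerine := by
  rw [← PySem.Dict.foldl_insert_getD_add_one_eq_counter]
  apply PySem.List.foldl_congr_mem
  intro d t _
  by_cases h : d.contains t
  · simp [h]
  · have hf : d.contains t = false := by simpa using h
    rw [if_neg h, PySem.Dict.getD_of_not_contains d 0 hf]
    norm_num

theorem vals_bounds (tangerine : List Int) (v : Int)
    (hv : v ∈ (PySem.Dict.counter tangerine).values) :
    1 ≤ v ∧ v ≤ (tangerine.length : Int) := by
  have : (PySem.Dict.counter tangerine).values
      = (PySem.Set.ofList tangerine).map (fun x => ((tangerine.count x : Nat) : Int)) := by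
    show ((PySem.Dict.counter tangerine).items.map (·.2)) = _
    rw [PySem.Dict.items_counter, List.map_map]
    rfl
  rw [this] at hv
  rcases List.mem_map.mp hv with ⟨x, hx, rfl⟩
  have hxt : x ∈ tangerine := (PySem.Set.mem_ofList _ _).mp hx
  constructor
  · exact_mod_cast List.count_pos_iff.mpr hxt
  · exact_mod_cast List.count_le_length

-- ===== VERDICT (by name: the statement is the Claim_ definition above) =====
theorem solution_spec : Claim_equal_solution := by
  intro k tangerine _ _
  unfold Spec_solution solution solution_alt
  simp only [countDict_eq_counter]
  set vals := (PySem.Dict.counter tangerine).values with hvals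
  rw [sorted_eq_flat_rev vals tangerine.length
        (fun v hv => (vals_bounds tangerine v hv).1)
        (fun v hv => (vals_bounds tangerine v hv).2)]
  rw [loopA_eq_loopD, mainLoop]
  simp only [PySem.Dict.foldl_insert_getD_add_one_eq_counter]
  rfl
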